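-- pv_equiv track=rewrite | github.com/voltZs/aoc-2024 | 22/22.py | generate_sequence_dict
-- ===== SOURCE A (Python) =====
-- from collections import deque
--
-- def mix_and_prune(secret_number, new_number):
--     return (new_number ^ secret_number) % 16777216
--
-- def get_next_secret_number(secret_number):
--     new_secret = mix_and_prune(secret_number * 64, secret_number)
--     new_secret = mix_and_prune(new_secret // 32, new_secret)
--     return mix_and_prune(new_secret * 2048, new_secret)
--
-- def attempt_add_sequence_to_dict(dict, sequence, price):
--     sequence_string = ",".join([str(n) for n in sequence])
--     existing_price = dict.get(sequence_string)
--     if not existing_price: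
--         dict[sequence_string] = price
--
-- def generate_sequence_dict(seed, iterations):
--     dict = {}
--     current_secret = seed
--     differences = deque([])
--     for i in range(iterations):
--         last_secret = current_secret
--         last_price = last_secret % 10
--         new_secret = get_next_secret_number(current_secret)
--         new_price = new_secret % 10
--
--         differences.appendleft(new_price - last_price)
--         if i > 3:
--             differences.pop()
--
--         if len(differences) == 4:
--             attempt_add_sequence_to_dict(dict, differences, new_price)
--         current_secret = new_secret
--
--     return dict
-- ===== SOURCE B (Python) =====
-- def mix_and_prune(secret_number, new_number):
--     return (new_number ^ secret_number) % 16777216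
--
-- def get_next_secret_number(secret_number):
--     new_secret = mix_and_prune(secret_number * 64, secret_number)
--     new_secret = mix_and_prune(new_secret // 32, new_secret)
--     return mix_and_prune(new_secret * 2048, new_secret)
--
-- def generate_sequence_dict(seed, iterations):
--     # Phase 1: materialise the whole price series, then scan it by index --
--     # no rolling deque, no per-iteration window bookkeeping.
--     prices = []
--     secret = seed
--     for _ in range(iterations):
--         prices.append(secret % 10)
--         secret = get_next_secret_number(secret)
--     prices.append(secret % 10)
--     diffs = [prices[k + 1] - prices[k] for k in range(len(prices) - 1)]
--     result = {}
--     for j in range(3, len(diffs)):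
--         key = ",".join([str(diffs[j]), str(diffs[j - 1]), str(diffs[j - 2]), str(diffs[j - 3])])
--         if not result.get(key):
--             result[key] = prices[j + 1]
--     return result
-- ===== Notes on version B (the rewrite author's own statement) =====
-- stated objective: alternative
-- what changed: Replaces the single stateful loop with its rolling 4-element deque (appendleft/pop) and dict-helper by a three-phase pipeline: materialise the full price list, derive the diffs list by indexed comprehension, then one indexed scan j=3..len(diffs)-1 building each key directly from diffs[j..j-3] (newest-first) with the same zero/absent-overwrite rule.
import Mathlib
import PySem

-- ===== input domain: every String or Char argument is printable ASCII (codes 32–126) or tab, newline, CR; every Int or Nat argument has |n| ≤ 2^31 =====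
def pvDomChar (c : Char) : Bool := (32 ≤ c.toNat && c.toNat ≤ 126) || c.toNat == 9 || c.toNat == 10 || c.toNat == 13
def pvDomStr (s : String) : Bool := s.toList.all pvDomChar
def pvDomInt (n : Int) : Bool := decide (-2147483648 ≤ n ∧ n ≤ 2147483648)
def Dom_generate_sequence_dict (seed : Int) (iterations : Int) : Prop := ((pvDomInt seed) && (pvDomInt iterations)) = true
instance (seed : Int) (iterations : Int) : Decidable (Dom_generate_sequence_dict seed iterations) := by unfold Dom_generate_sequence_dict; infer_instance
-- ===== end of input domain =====

-- B replaces A's stateful loop with a rolling deque by a three-phase pipeline (price list, diffs list, indexed scan); alternative decomposition, same O(n) cost.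


-- ===== PORT A =====
def mix_and_prune (secret_number new_number : Int) : Int :=
  PySem.Int.mod (PySem.Int.bxor new_number secret_number) 16777216

def get_next_secret_number (secret_number : Int) : Int :=
  let new_secret := mix_and_prune (secret_number * 64) secret_number
  let new_secret := mix_and_prune (PySem.Int.floordiv new_secret 32) new_secret
  mix_and_prune (new_secret * 2048) new_secret

-- 'if not existing_price' is Python truthiness on Optional[int]: falsy iff None or 0 — (get? ...).getD 0 = 0
def attempt_add_sequence_to_dict (d : PySem.Dict String Int) (sequence : List Int) (price : Int) :
    PySem.Dict String Int :=
  let sequence_string := PySem.Str.join "," (sequence.map PySem.Int.toStr)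
  if (d.get? sequence_string).getD 0 = 0 then d.insert sequence_string price else d

def generate_sequence_dict (seed : Int) (iterations : Int) : List (String × Int) :=
  let st := (PySem.List.pyRange 0 iterations 1).foldl
    (fun (st : PySem.Dict String Int × Int × List Int) i =>
      let dict := st.1
      let current_secret := st.2.1
      let last_price := PySem.Int.mod current_secret 10
      let new_secret := get_next_secret_number current_secret
      let new_price := PySem.Int.mod new_secret 10
      let differences := (new_price - last_price) :: st.2.2   -- appendleft
      let differences := if i > 3 then differences.dropLast else differences  -- pop from the right
      let dict := if differences.length = 4 then attempt_add_sequence_to_dict dict differences new_price else dict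
      (dict, new_secret, differences))
    (PySem.Dict.empty, seed, [])
  st.1.items

-- ===== PORT B =====
def generate_sequence_dict_alt (seed : Int) (iterations : Int) : List (String × Int) :=
  let ps := (PySem.List.pyRange 0 iterations 1).foldl
    (fun (st : List Int × Int) _ => (st.1 ++ [PySem.Int.mod st.2 10], get_next_secret_number st.2))
    ([], seed)
  let prices := ps.1 ++ [PySem.Int.mod ps.2 10]
  let diffs := (PySem.List.pyRange 0 (PySem.List.len prices - 1) 1).map
    (fun k => PySem.List.pyGetD prices (k + 1) 0 - PySem.List.pyGetD prices k 0)
  let result := (PySem.List.pyRange 3 (PySem.List.len diffs) 1).foldl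
    (fun (d : PySem.Dict String Int) j =>
      let key := PySem.Str.join ","
        [PySem.Int.toStr (PySem.List.pyGetD diffs j 0),
         PySem.Int.toStr (PySem.List.pyGetD diffs (j - 1) 0),
         PySem.Int.toStr (PySem.List.pyGetD diffs (j - 2) 0),
         PySem.Int.toStr (PySem.List.pyGetD diffs (j - 3) 0)]
      if (d.get? key).getD 0 = 0 then d.insert key (PySem.List.pyGetD prices (j + 1) 0) else d)
    PySem.Dict.empty
  result.items

-- ===== PRECONDITION & SPEC =====
def Spec_generate_sequence_dict (seed : Int) (iterations : Int) (out : List (String × Int)) : Prop := out = generate_sequence_dict_alt seed iterations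
instance (seed : Int) (iterations : Int) (out : List (String × Int)) : Decidable (Spec_generate_sequence_dict seed iterations out) := by unfold Spec_generate_sequence_dict; infer_instance

-- ===== CLAIM (what is proved, stated in full; the proofs are below) =====
def Claim_equal_generate_sequence_dict : Prop := ∀ (seed : Int) (iterations : Int), Dom_generate_sequence_dict seed iterations → Spec_generate_sequence_dict seed iterations (generate_sequence_dict seed iterations)

-- ===== LEMMAS AND PROOFS =====

-- the k-th secret, price, difference of seed's sequence (proof-only abbreviations)
def secA (seed : Int) : Nat → Int
  | 0 => seed
  | n + 1 => get_next_secret_number (secA seed n)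

def prA (seed : Int) (k : Nat) : Int := PySem.Int.mod (secA seed k) 10

def dfA (seed : Int) (k : Nat) : Int := prA seed (k + 1) - prA seed k

-- the dict update both programs perform at iteration m (a no-op before m = 3)
def stepD (seed : Int) (m : Nat) (d : PySem.Dict String Int) : PySem.Dict String Int :=
  if 3 ≤ m then
    let key := PySem.Str.join ","
      ([dfA seed m, dfA seed (m - 1), dfA seed (m - 2), dfA seed (m - 3)].map PySem.Int.toStr)
    if (d.get? key).getD 0 = 0 then d.insert key (prA seed (m + 1)) else d
  else d

def specD (seed : Int) : Nat → PySem.Dict String Int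
  | 0 => PySem.Dict.empty
  | m + 1 => stepD seed m (specD seed m)

-- A's deque after m iterations (newest first)
def dequeAt (seed : Int) (m : Nat) : List Int :=
  (((List.range m).reverse).map (dfA seed)).take 4

lemma deque_succ (seed : Int) (n : Nat) :
    dequeAt seed (n + 1) = dfA seed n :: (((List.range n).reverse).map (dfA seed)).take 3 := by
  simp [dequeAt, List.range_succ]

lemma deque_len (seed : Int) (n : Nat) : (dequeAt seed n).length = min n 4 := by
  simp [dequeAt]; omega

lemma deque_cons_small (seed : Int) {n : Nat} (h : n ≤ 3) :
    dfA seed n :: dequeAt seed n = dequeAt seed (n + 1) := by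
  have hlen : (((List.range n).reverse).map (dfA seed)).length = n := by simp
  rw [deque_succ]
  unfold dequeAt
  rw [List.take_of_length_le (by omega), List.take_of_length_le (by omega)]

lemma deque_drop_big (seed : Int) {n : Nat} (h : 4 ≤ n) :
    (dfA seed n :: dequeAt seed n).dropLast = dequeAt seed (n + 1) := by
  have hlen : (((List.range n).reverse).map (dfA seed)).length = n := by simp
  have hne : dequeAt seed n ≠ [] := by
    intro hnil
    have := deque_len seed n
    rw [hnil] at this
    simp at this
    omega
  rw [List.dropLast_cons_of_ne_nil hne, deque_succ]
  unfold dequeAt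
  rw [List.dropLast_eq_take]
  rw [List.take_take]
  congr 1
  simp
  omega

lemma deque_four (seed : Int) {n : Nat} (h : 3 ≤ n) :
    dequeAt seed (n + 1) = [dfA seed n, dfA seed (n - 1), dfA seed (n - 2), dfA seed (n - 3)] := by
  obtain ⟨m, rfl⟩ : ∃ m, n = m + 3 := ⟨n - 3, by omega⟩
  show dequeAt seed (m + 4) = _
  have : m + 4 = (((m + 1) + 1) + 1) + 1 := by omega
  rw [this]
  simp [dequeAt, List.range_succ]

-- the two branch computations of A's iteration body
lemma diffs_step (seed : Int) (n : Nat) :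
    (if ((n : Int)) > 3 then (dfA seed n :: dequeAt seed n).dropLast
     else dfA seed n :: dequeAt seed n) = dequeAt seed (n + 1) := by
  by_cases hn : 3 < n
  · rw [if_pos (by exact_mod_cast hn)]
    exact deque_drop_big seed (by omega)
  · rw [if_neg (by exact_mod_cast hn)]
    exact deque_cons_small seed (by omega)

lemma dict_step (seed : Int) (n : Nat) (d : PySem.Dict String Int) :
    (if (dequeAt seed (n + 1)).length = 4 then
        attempt_add_sequence_to_dict d (dequeAt seed (n + 1)) (PySem.Int.mod (get_next_secret_number (secA seed n)) 10)
      else d) = stepD seed n d := by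
  by_cases h3 : 3 ≤ n
  · rw [if_pos (by rw [deque_len]; omega), deque_four seed h3]
    simp [attempt_add_sequence_to_dict, stepD, h3, prA]
    rfl
  · rw [if_neg (by rw [deque_len]; omega)]
    simp [stepD, h3]

-- invariant of A's loop
lemma A_fold (seed : Int) (n : Nat) :
    (PySem.List.pyRange 0 (n : Int) 1).foldl
      (fun (st : PySem.Dict String Int × Int × List Int) i =>
        let dict := st.1
        let current_secret := st.2.1
        let last_price := PySem.Int.mod current_secret 10
        let new_secret := get_next_secret_number current_secret
        let new_price := PySem.Int.mod new_secret 10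
        let differences := (new_price - last_price) :: st.2.2
        let differences := if i > 3 then differences.dropLast else differences
        let dict := if differences.length = 4 then attempt_add_sequence_to_dict dict differences new_price else dict
        (dict, new_secret, differences))
      (PySem.Dict.empty, seed, [])
    = (specD seed n, secA seed n, dequeAt seed n) := by
  induction n with
  | zero =>
    rw [show ((0 : Nat) : Int) = 0 by norm_num, PySem.List.pyRange_one_eq_nil le_rfl]
    simp [specD, secA, dequeAt]
  | succ n ih =>
    rw [show ((n + 1 : Nat) : Int) = (n : Int) + 1 by push_cast; ring,
        PySem.List.pyRange_one_succ_right (by positivity), List.foldl_append, ih,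
        List.foldl_cons, List.foldl_nil]
    simp only []
    have hprice : PySem.Int.mod (get_next_secret_number (secA seed n)) 10 - PySem.Int.mod (secA seed n) 10
        = dfA seed n := rfl
    rw [hprice, diffs_step, dict_step]
    rfl

-- invariant of B's price-building loop
lemma B_prices (seed : Int) (n : Nat) :
    (PySem.List.pyRange 0 (n : Int) 1).foldl
      (fun (st : List Int × Int) _ => (st.1 ++ [PySem.Int.mod st.2 10], get_next_secret_number st.2))
      ([], seed)
    = ((List.range n).map (prA seed), secA seed n) := by
  induction n with
  | zero =>
    rw [show ((0 : Nat) : Int) = 0 by norm_num, PySem.List.pyRange_one_eq_nil le_rfl]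
    simp [secA]
  | succ n ih =>
    rw [show ((n + 1 : Nat) : Int) = (n : Int) + 1 by push_cast; ring,
        PySem.List.pyRange_one_succ_right (by positivity), List.foldl_append, ih,
        List.foldl_cons, List.foldl_nil]
    simp [List.range_succ, prA, secA]

lemma idx_map_range (f : Nat → Int) (K j : Nat) (h : j < K) :
    PySem.List.pyGetD ((List.range K).map f) ((j : Nat) : Int) 0 = f j := by
  simp [PySem.List.pyGetD_natCast, List.getD, h]

lemma B_diffs (seed : Int) (n : Nat) :
    (PySem.List.pyRange 0 (n : Int) 1).map (fun k =>
        PySem.List.pyGetD ((List.range (n + 1)).map (prA seed)) (k + 1) 0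
          - PySem.List.pyGetD ((List.range (n + 1)).map (prA seed)) k 0)
    = (List.range n).map (dfA seed) := by
  rw [PySem.List.pyRange_one]
  rw [show (((n : Int) - 0).toNat) = n by omega]
  rw [List.map_map]
  apply List.map_congr_left
  intro k hk
  have hk' : k < n := List.mem_range.mp hk
  simp only [Function.comp_apply, zero_add]
  rw [show ((k : Int) + 1) = ((k + 1 : Nat) : Int) by push_cast; ring]
  rw [idx_map_range _ _ _ (by omega), idx_map_range _ _ _ (by omega)]
  rfl

lemma specD_le_three (seed : Int) {m : Nat} (h : m ≤ 3) : specD seed m = PySem.Dict.empty := by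
  induction m with
  | zero => rfl
  | succ m ih =>
    show stepD seed m (specD seed m) = _
    rw [ih (by omega)]
    simp only [stepD]
    rw [if_neg (by omega : ¬ (3 : Nat) ≤ m)]

-- invariant of B's dict-building loop
lemma B_fold (seed : Int) (N : Nat) (m : Nat) (hm : m ≤ N) :
    (PySem.List.pyRange 3 (m : Int) 1).foldl
      (fun (d : PySem.Dict String Int) j =>
        let key := PySem.Str.join ","
          [PySem.Int.toStr (PySem.List.pyGetD ((List.range N).map (dfA seed)) j 0),
           PySem.Int.toStr (PySem.List.pyGetD ((List.range N).map (dfA seed)) (j - 1) 0),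
           PySem.Int.toStr (PySem.List.pyGetD ((List.range N).map (dfA seed)) (j - 2) 0),
           PySem.Int.toStr (PySem.List.pyGetD ((List.range N).map (dfA seed)) (j - 3) 0)]
        if (d.get? key).getD 0 = 0 then d.insert key (PySem.List.pyGetD ((List.range (N + 1)).map (prA seed)) (j + 1) 0) else d)
      PySem.Dict.empty
    = specD seed m := by
  induction m with
  | zero =>
    rw [show ((0 : Nat) : Int) = 0 by norm_num, PySem.List.pyRange_one_eq_nil (by norm_num)]
    rfl
  | succ m ih =>
    by_cases h3 : m + 1 ≤ 3
    · rw [show ((m + 1 : Nat) : Int) = (m : Int) + 1 by push_cast; ring,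
          PySem.List.pyRange_one_eq_nil (by exact_mod_cast (by omega : ((m : Int) + 1) ≤ 3))]
      rw [specD_le_three seed h3]
      rfl
    · have h3' : 3 ≤ m := by omega
      rw [show ((m + 1 : Nat) : Int) = (m : Int) + 1 by push_cast; ring,
          PySem.List.pyRange_one_succ_right (by exact_mod_cast h3'), List.foldl_append,
          ih (by omega), List.foldl_cons, List.foldl_nil]
      simp only []
      rw [show ((m : Int) - 1) = ((m - 1 : Nat) : Int) by omega,
          show ((m : Int) - 2) = ((m - 2 : Nat) : Int) by omega,
          show ((m : Int) - 3) = ((m - 3 : Nat) : Int) by omega,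
          show ((m : Int) + 1) = ((m + 1 : Nat) : Int) by push_cast; ring]
      rw [idx_map_range _ _ _ (by omega), idx_map_range _ _ _ (by omega),
          idx_map_range _ _ _ (by omega), idx_map_range _ _ _ (by omega),
          idx_map_range _ _ _ (by omega)]
      show _ = stepD seed m (specD seed m)
      simp [stepD, h3']

lemma A_eq (seed : Int) (n : Nat) :
    generate_sequence_dict seed (n : Int) = (specD seed n).items := by
  unfold generate_sequence_dict
  simp only []
  rw [A_fold]

lemma B_eq (seed : Int) (n : Nat) :
    generate_sequence_dict_alt seed (n : Int) = (specD seed n).items := by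
  unfold generate_sequence_dict_alt
  simp only []
  rw [B_prices]
  have hpr : ((List.range n).map (prA seed), secA seed n).1 ++ [PySem.Int.mod (((List.range n).map (prA seed), secA seed n)).2 10]
      = (List.range (n + 1)).map (prA seed) := by
    simp [List.range_succ, prA]
  rw [hpr]
  have hlen : PySem.List.len ((List.range (n + 1)).map (prA seed)) - 1 = (n : Int) := by
    simp [PySem.List.len_eq]
  rw [hlen, B_diffs]
  have hlen2 : PySem.List.len ((List.range n).map (dfA seed)) = (n : Int) := by
    simp [PySem.List.len_eq]
  rw [hlen2, B_fold seed n n le_rfl]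

-- ===== VERDICT (by name: the statement is the Claim_ definition above) =====
theorem generate_sequence_dict_spec : Claim_equal_generate_sequence_dict := by
  intro seed iterations _
  unfold Spec_generate_sequence_dict
  by_cases h : 0 ≤ iterations
  · lift iterations to ℕ using h with n
    rw [A_eq, B_eq]
  · have hnil : PySem.List.pyRange 0 iterations 1 = [] :=
      PySem.List.pyRange_one_eq_nil (by omega)

    simp [generate_sequence_dict, generate_sequence_dict_alt, hnil,
      PySem.List.pyRange_one_eq_nil, PySem.List.len_eq]
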